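-- pv_equiv track=rewrite | github.com/yichichung/transistor_placement | preprocess/asap7_to_envjson.py | _aggregate_nets
-- ===== SOURCE A (Python) =====
-- from collections import defaultdict
-- from typing import Dict, List, Tuple
--
-- def _aggregate_nets(rowN: List[dict], rowP: List[dict],
--                     name_map_N: Dict[int, str],
--                     name_map_P: Dict[int, str]) -> List[List[str]]:
--     """
--     把所有 pin 先依 netname 聚合，輸出為:
--       [ "MN0.D", "MN1.S", ..., "<net_name>" ]
--     最後一個元素是 net 名。
--     """
--     net2pins = defaultdict(list)
--
--     def add(dev: str, pin: str, net: str):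
--         if net is None:
--             return
--         net2pins[net].append(f"{dev}.{pin}")
--
--     # NMOS pins
--     for i, t in enumerate(rowN):
--         n = name_map_N[i]
--         add(n, "D", t.get("net_drn", "N"))
--         add(n, "G", t.get("gate_net", "G"))
--         add(n, "S", t.get("net_src", "S"))
--         add(n, "B", "VSS")  # bulk/body
--
--     # PMOS pins
--     for i, t in enumerate(rowP):
--         p = name_map_P[i]
--         add(p, "D", t.get("net_drn", "P"))
--         add(p, "G", t.get("gate_net", "G"))
--         add(p, "S", t.get("net_src", "S"))
--         add(p, "B", "VDD")  # bulk/body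
--
--     nets = []
--     for netname, pins in net2pins.items():
--         pins_unique = []
--         seen = set()
--         # 去重，避免同一裝置在同一 net 重複被塞入
--         for pin in pins:
--             if pin not in seen:
--                 seen.add(pin)
--                 pins_unique.append(pin)
--         if len(pins_unique) >= 1:  # 保留單 pin net 也行，下游會再過濾
--             nets.append(pins_unique + [netname])
--     return nets
-- ===== SOURCE B (Python) =====
-- def _aggregate_nets(rowN, rowP, name_map_N, name_map_P):
--     # Flat event list + per-net filtering: no net->pins dict and no seen-sets.
--     events = []
--     for rows, name_map, drn_def, bulk in ((rowN, name_map_N, "N", "VSS"),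
--                                           (rowP, name_map_P, "P", "VDD")):
--         for i, t in enumerate(rows):
--             dev = name_map[i]
--             for pin, net in (("D", t.get("net_drn", drn_def)),
--                              ("G", t.get("gate_net", "G")),
--                              ("S", t.get("net_src", "S")),
--                              ("B", bulk)):
--                 if net is not None:
--                     events.append((net, f"{dev}.{pin}"))
--     return [list(dict.fromkeys(s for n, s in events if n == net)) + [net]
--             for net in dict.fromkeys(n for n, _ in events)]
-- ===== Notes on version B (the rewrite author's own statement) =====
-- stated objective: alternative
-- what changed: B keeps no net->pins dict and no seen-sets at all: it records a flat ordered list of (net, 'dev.pin') events, then derives the net order with dict.fromkeys over the event nets and builds each output row by filtering the whole event list for that net and deduplicating with dict.fromkeys, whereas A groups into a defaultdict during the scan and dedups each bucket with an explicit seen-set loop.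
import Mathlib
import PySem

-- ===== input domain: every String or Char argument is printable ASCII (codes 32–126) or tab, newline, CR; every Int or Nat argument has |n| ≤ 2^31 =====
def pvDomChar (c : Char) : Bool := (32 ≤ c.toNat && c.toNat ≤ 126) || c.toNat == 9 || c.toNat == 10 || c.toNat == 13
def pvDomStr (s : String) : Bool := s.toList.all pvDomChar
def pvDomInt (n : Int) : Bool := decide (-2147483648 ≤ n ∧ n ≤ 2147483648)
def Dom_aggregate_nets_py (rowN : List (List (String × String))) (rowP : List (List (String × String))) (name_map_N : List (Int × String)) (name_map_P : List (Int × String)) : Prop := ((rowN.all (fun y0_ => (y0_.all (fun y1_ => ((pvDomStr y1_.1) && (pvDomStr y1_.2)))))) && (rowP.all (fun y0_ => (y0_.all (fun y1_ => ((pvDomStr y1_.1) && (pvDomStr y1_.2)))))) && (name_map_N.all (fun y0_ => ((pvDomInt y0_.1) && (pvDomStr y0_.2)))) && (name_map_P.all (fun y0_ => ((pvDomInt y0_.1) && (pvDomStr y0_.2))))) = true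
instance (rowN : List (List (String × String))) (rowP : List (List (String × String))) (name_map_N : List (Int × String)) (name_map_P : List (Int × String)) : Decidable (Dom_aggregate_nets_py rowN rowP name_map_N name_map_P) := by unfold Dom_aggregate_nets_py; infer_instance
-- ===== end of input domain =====

-- ===== PORT A =====
-- B drops A's grouping dict for a flat event list with per-net filtering; return-value equivalence only.
-- A's helper add(): defaultdict(list) append.  'net' is typed String under the type convention,
-- so Python's 'net is None' early return can never fire and is dropped (exact on the typed domain).
def aggA_add (d : PySem.Dict String (List String)) (dev pin net : String) :
    PySem.Dict String (List String) :=
  d.insert net (d.getD net [] ++ [dev ++ "." ++ pin])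

-- body of A's two per-row loops (identical up to the drain default and the bulk net)
def aggA_row (nm : PySem.Dict Int String) (drnDef bulk : String)
    (d : PySem.Dict String (List String)) (it : Int × List (String × String)) :
    PySem.Dict String (List String) :=
  let n := ((nm.get? it.1).getD "")   -- name_map[i]; Pre_ guarantees the key exists
  let t := PySem.Dict.mk it.2
  let d := aggA_add d n "D" (t.getD "net_drn" drnDef)
  let d := aggA_add d n "G" (t.getD "gate_net" "G")
  let d := aggA_add d n "S" (t.getD "net_src" "S")
  aggA_add d n "B" bulk

-- A's per-net dedup loop (pins_unique / seen)
def aggA_dedup (pins : List String) : List String :=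
  (pins.foldl (fun st pin =>
      if pin ∈ st.2 then st else (st.1 ++ [pin], PySem.Set.add st.2 pin))
    (([] : List String), (PySem.Set.empty : PySem.Set String))).1

def aggregate_nets_py (rowN : List (List (String × String))) (rowP : List (List (String × String))) (name_map_N : List (Int × String)) (name_map_P : List (Int × String)) : List (List String) :=
  let d := (PySem.List.enumerate rowN).foldl (aggA_row (PySem.Dict.mk name_map_N) "N" "VSS") PySem.Dict.empty
  let d := (PySem.List.enumerate rowP).foldl (aggA_row (PySem.Dict.mk name_map_P) "P" "VDD") d
  d.items.foldl (fun nets kv =>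
      let pu := aggA_dedup kv.2
      if pu.length ≥ 1 then nets ++ [pu ++ [kv.1]] else nets) []

-- ===== PORT B =====
-- B's per-row body: append the four (net, "dev.pin") events to the flat event list
-- ('net is not None' can never be false on the typed domain and is dropped, as in port A)
def aggB_row (nm : PySem.Dict Int String) (drnDef bulk : String)
    (ev : List (String × String)) (it : Int × List (String × String)) :
    List (String × String) :=
  let dev := ((nm.get? it.1).getD "")
  let t := PySem.Dict.mk it.2
  ev ++ [(t.getD "net_drn" drnDef, dev ++ "." ++ "D"),
         (t.getD "gate_net" "G", dev ++ "." ++ "G"),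
         (t.getD "net_src" "S", dev ++ "." ++ "S"),
         (bulk, dev ++ "." ++ "B")]

-- Source B's dict.fromkeys ordered dedup is PySem.List.dedup (the stdlib-call correspondence)
def aggregate_nets_py_alt (rowN : List (List (String × String))) (rowP : List (List (String × String))) (name_map_N : List (Int × String)) (name_map_P : List (Int × String)) : List (List String) :=
  let ev := (PySem.List.enumerate rowN).foldl (aggB_row (PySem.Dict.mk name_map_N) "N" "VSS") []
  let ev := (PySem.List.enumerate rowP).foldl (aggB_row (PySem.Dict.mk name_map_P) "P" "VDD") ev
  (PySem.List.dedup (ev.map Prod.fst)).map (fun net =>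
    PySem.List.dedup ((ev.filter (fun e => e.1 == net)).map Prod.snd) ++ [net])

-- ===== PRECONDITION & SPEC =====
-- Pre_ excludes exactly the inputs where A raises KeyError: an index of rowN (resp. rowP)
-- missing from name_map_N (resp. name_map_P).
def Pre_aggregate_nets_py (rowN : List (List (String × String))) (rowP : List (List (String × String))) (name_map_N : List (Int × String)) (name_map_P : List (Int × String)) : Prop :=
  (∀ i ∈ List.range rowN.length, (PySem.Dict.mk name_map_N).contains (i : Int) = true) ∧
  (∀ i ∈ List.range rowP.length, (PySem.Dict.mk name_map_P).contains (i : Int) = true)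
instance (rowN : List (List (String × String))) (rowP : List (List (String × String))) (name_map_N : List (Int × String)) (name_map_P : List (Int × String)) : Decidable (Pre_aggregate_nets_py rowN rowP name_map_N name_map_P) := by unfold Pre_aggregate_nets_py; infer_instance

def pvWitness_aggregate_nets_py : (List (List (String × String))) × (List (List (String × String))) × (List (Int × String)) × (List (Int × String)) :=
  ([[("net_drn", "n1"), ("gate_net", "a")]], [[("net_src", "n1")]],
   [((0 : Int), "MN0")], [((0 : Int), "MP0")])

def Spec_aggregate_nets_py (rowN : List (List (String × String))) (rowP : List (List (String × String))) (name_map_N : List (Int × String)) (name_map_P : List (Int × String)) (out : List (List String)) : Prop := out = aggregate_nets_py_alt rowN rowP name_map_N name_map_P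
instance (rowN : List (List (String × String))) (rowP : List (List (String × String))) (name_map_N : List (Int × String)) (name_map_P : List (Int × String)) (out : List (List String)) : Decidable (Spec_aggregate_nets_py rowN rowP name_map_N name_map_P out) := by unfold Spec_aggregate_nets_py; infer_instance

-- ===== CLAIM (what is proved, stated in full; the proofs are below) =====
def Claim_equal_aggregate_nets_py : Prop := ∀ (rowN : List (List (String × String))) (rowP : List (List (String × String))) (name_map_N : List (Int × String)) (name_map_P : List (Int × String)), Dom_aggregate_nets_py rowN rowP name_map_N name_map_P → Pre_aggregate_nets_py rowN rowP name_map_N name_map_P → Spec_aggregate_nets_py rowN rowP name_map_N name_map_P (aggregate_nets_py rowN rowP name_map_N name_map_P)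

-- ===== LEMMAS AND PROOFS =====

-- proof-only simulation invariant: A's grouping dict is determined by B's flat event list
def AggInv (d : PySem.Dict String (List String)) (ev : List (String × String)) : Prop :=
  d.keys = PySem.Set.ofList (ev.map Prod.fst) ∧
  (∀ k, d.getD k [] = (ev.filter (fun e => e.1 == k)).map Prod.snd)

lemma aggInv_add (d : PySem.Dict String (List String)) (ev : List (String × String))
    (dev pin net : String) (h : AggInv d ev) :
    AggInv (aggA_add d dev pin net) (ev ++ [(net, dev ++ "." ++ pin)]) := by
  obtain ⟨hk, hg⟩ := h
  constructor
  · show (d.insert net _).keys = _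
    simp only [List.map_append, List.map_cons, List.map_nil]
    rw [PySem.Set.ofList_append_singleton, ← hk]
    by_cases hc : d.contains net = true
    · rw [PySem.Dict.keys_insert_of_contains _ _ hc,
          PySem.Set.add_of_mem ((PySem.Dict.contains_iff_mem_keys _ _).1 hc)]
    · have hc' : d.contains net = false := by simpa using hc
      rw [PySem.Dict.keys_insert_of_not_contains _ _ hc',
          PySem.Set.add_of_not_mem (fun hm => by
            simp [(PySem.Dict.contains_iff_mem_keys _ _).2 hm] at hc')]
  · intro k
    by_cases hkn : k = net
    · subst hkn
      show (d.insert k _).getD k [] = _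
      rw [PySem.Dict.getD_insert_self, hg k]
      simp
    · show (d.insert net _).getD k [] = _
      rw [PySem.Dict.getD_insert_of_ne _ _ _ hkn, hg k]
      have : (net == k) = false := by simpa using fun e => hkn e.symm
      simp [this]

lemma aggInv_row (nm : PySem.Dict Int String) (drnDef bulk : String)
    (d : PySem.Dict String (List String)) (ev : List (String × String))
    (it : Int × List (String × String)) (h : AggInv d ev) :
    AggInv (aggA_row nm drnDef bulk d it) (aggB_row nm drnDef bulk ev it) := by
  have h1 := aggInv_add d ev ((nm.get? it.1).getD "") "D"
    ((PySem.Dict.mk it.2).getD "net_drn" drnDef) h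
  have h2 := aggInv_add _ _ ((nm.get? it.1).getD "") "G"
    ((PySem.Dict.mk it.2).getD "gate_net" "G") h1
  have h3 := aggInv_add _ _ ((nm.get? it.1).getD "") "S"
    ((PySem.Dict.mk it.2).getD "net_src" "S") h2
  have h4 := aggInv_add _ _ ((nm.get? it.1).getD "") "B" bulk h3
  simpa [aggA_row, aggB_row, List.append_assoc] using h4

lemma aggInv_fold (nm : PySem.Dict Int String) (drnDef bulk : String)
    (l : List (Int × List (String × String)))
    (d : PySem.Dict String (List String)) (ev : List (String × String))
    (h : AggInv d ev) :
    AggInv (l.foldl (aggA_row nm drnDef bulk) d) (l.foldl (aggB_row nm drnDef bulk) ev) := by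
  induction l generalizing d ev with
  | nil => exact h
  | cons a t ih =>
      rw [List.foldl_cons, List.foldl_cons]
      exact ih _ _ (aggInv_row nm drnDef bulk d ev a h)

lemma aggInv_empty : AggInv PySem.Dict.empty [] := ⟨rfl, fun _ => rfl⟩

-- A's dedup loop is set(ofList): both state components stay equal to the running set
lemma dedup_loop (v : List String) : ∀ (c : PySem.Set String),
    v.foldl (fun st pin => if pin ∈ st.2 then st else (st.1 ++ [pin], PySem.Set.add st.2 pin))
        ((c : List String), c)
      = (v.foldl PySem.Set.add c, v.foldl PySem.Set.add c) := by
  induction v with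
  | nil => intro c; rfl
  | cons x t ih =>
      intro c
      simp only [List.foldl_cons]
      by_cases hx : x ∈ c
      · rw [if_pos hx, PySem.Set.add_of_mem hx]
        exact ih c
      · rw [if_neg hx, PySem.Set.add_of_not_mem hx]
        exact ih (c ++ [x])

lemma aggA_dedup_eq (v : List String) : aggA_dedup v = PySem.Set.ofList v := by
  unfold aggA_dedup
  rw [show (PySem.Set.empty : PySem.Set String) = ([] : List String) from rfl]
  rw [dedup_loop v []]
  rw [PySem.Set.ofList_eq_foldl]

lemma final_fold (l : List (String × List String)) (acc : List (List String))
    (h : ∀ kv ∈ l, kv.2 ≠ []) :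
    l.foldl (fun nets kv =>
        let pu := aggA_dedup kv.2
        if pu.length ≥ 1 then nets ++ [pu ++ [kv.1]] else nets) acc
      = acc ++ l.map (fun kv => (PySem.Set.ofList kv.2 : List String) ++ [kv.1]) := by
  induction l generalizing acc with
  | nil => simp
  | cons a t ih =>
      have ha : a.2 ≠ [] := h a (by simp)
      have hlen : (aggA_dedup a.2).length ≥ 1 := by
        rw [aggA_dedup_eq]
        cases hv : a.2 with
        | nil => exact absurd hv ha
        | cons x xs => rw [PySem.Set.ofList_cons]; simp
      simp only [List.foldl_cons, if_pos hlen]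
      rw [ih _ (fun kv hkv => h kv (List.mem_cons_of_mem _ hkv)), aggA_dedup_eq]
      simp

-- ===== VERDICT (by name: the statement is the Claim_ definition above) =====
theorem aggregate_nets_py_spec : Claim_equal_aggregate_nets_py := by
  intro rowN rowP name_map_N name_map_P _hdom _hpre
  show aggregate_nets_py rowN rowP name_map_N name_map_P
      = aggregate_nets_py_alt rowN rowP name_map_N name_map_P
  simp only [aggregate_nets_py, aggregate_nets_py_alt]
  have h1 := aggInv_fold (PySem.Dict.mk name_map_N) "N" "VSS" (PySem.List.enumerate rowN)
    PySem.Dict.empty [] aggInv_empty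
  have h2 := aggInv_fold (PySem.Dict.mk name_map_P) "P" "VDD" (PySem.List.enumerate rowP) _ _ h1
  set d := (PySem.List.enumerate rowP).foldl (aggA_row (PySem.Dict.mk name_map_P) "P" "VDD")
    ((PySem.List.enumerate rowN).foldl (aggA_row (PySem.Dict.mk name_map_N) "N" "VSS") PySem.Dict.empty)
  set ev := (PySem.List.enumerate rowP).foldl (aggB_row (PySem.Dict.mk name_map_P) "P" "VDD")
    ((PySem.List.enumerate rowN).foldl (aggB_row (PySem.Dict.mk name_map_N) "N" "VSS") [])
  obtain ⟨hk, hg⟩ := h2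
  have hnd : d.keys.Nodup := by rw [hk]; exact PySem.Set.nodup_ofList _
  have hne : ∀ kv ∈ d.items, kv.2 ≠ [] := by
    intro kv hkv
    have hv : d.getD kv.1 [] = kv.2 := PySem.Dict.getD_of_mem_items d hkv hnd []
    have hmk : kv.1 ∈ d.keys := PySem.Dict.mem_keys_of_mem_items d hkv
    rw [hk, PySem.Set.mem_ofList] at hmk
    obtain ⟨e, he, hefst⟩ := List.mem_map.1 hmk
    have : e ∈ ev.filter (fun e => e.1 == kv.1) :=
      List.mem_filter.2 ⟨he, by simp [hefst]⟩
    intro hnil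
    rw [← hv, hg kv.1] at hnil
    rw [List.map_eq_nil_iff.1 hnil] at this
    cases this
  rw [final_fold _ _ hne, List.nil_append,
      PySem.Dict.items_eq_map_keys d hnd [], List.map_map, hk]
  simp only [PySem.List.dedup_eq_ofList]
  apply List.map_congr_left
  intro k _
  simp [Function.comp, hg k]
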